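-- pv_equiv track=rewrite | github.com/Kinhs/Python-PTIT | PY01039 - Kiểm tra số đẹp.py | solution
-- ===== SOURCE A (Python) =====
-- def solution(s):
--     if s[0] == s[1]:
--         return "NO"
--     for i in range(len(s)):
--         if i % 2 == 0:
--             if s[i] != s[0]:
--                 return "NO"
--         else:
--             if s[i] != s[1]:
--                 return "NO"
--     return "YES"
-- ===== SOURCE B (Python) =====
-- def solution(s):
--     if s[0] == s[1]:
--         return "NO"
--     return "YES" if set(s[0::2]) == {s[0]} and set(s[1::2]) == {s[1]} else "NO"
-- ===== Notes on version B (the rewrite author's own statement) =====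
-- stated objective: alternative
-- what changed: Replaces the parity-branching index loop (with early returns) by two strided slices whose character sets are compared against the expected singletons.
import Mathlib
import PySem

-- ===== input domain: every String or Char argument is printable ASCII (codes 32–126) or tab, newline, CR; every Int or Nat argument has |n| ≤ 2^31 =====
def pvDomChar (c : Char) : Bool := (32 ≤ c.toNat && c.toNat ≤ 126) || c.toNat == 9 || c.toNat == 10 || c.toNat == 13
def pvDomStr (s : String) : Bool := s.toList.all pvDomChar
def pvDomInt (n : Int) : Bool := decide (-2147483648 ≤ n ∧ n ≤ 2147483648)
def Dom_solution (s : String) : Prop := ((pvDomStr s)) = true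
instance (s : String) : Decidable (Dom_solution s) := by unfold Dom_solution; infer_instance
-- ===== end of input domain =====

-- B replaces A's parity-branching index loop by two strided slices compared as character sets (alternative decomposition, same cost).

-- ===== PORT A =====
-- the 'for i in range(len(s))' loop: c is s[i], i the running index
def solutionLoop (c0 c1 : Char) : Nat → List Char → String
  | _, [] => "YES"
  | i, c :: rest =>
    if i % 2 = 0 then
      if c ≠ c0 then "NO" else solutionLoop c0 c1 (i + 1) rest
    else
      if c ≠ c1 then "NO" else solutionLoop c0 c1 (i + 1) rest

def solution (s : String) : String :=
  let cs := s.toList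
  match PySem.List.pyGet? cs 0, PySem.List.pyGet? cs 1 with
  | some c0, some c1 => if c0 = c1 then "NO" else solutionLoop c0 c1 0 cs
  | _, _ => "NO"   -- IndexError: unreachable under Pre_solution

-- ===== PORT B =====
def solution_alt (s : String) : String :=
  let cs := s.toList
  match PySem.List.pyGet? cs 0 with
  | none => "NO"   -- IndexError: unreachable under Pre_solution
  | some c0 =>
    match PySem.List.pyGet? cs 1 with
    | none => "NO"   -- IndexError: unreachable under Pre_solution
    | some c1 =>
      if c0 = c1 then "NO"
      else
        let ev := (PySem.List.slice? cs (some 0) none 2).getD []   -- s[0::2]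
        let od := (PySem.List.slice? cs (some 1) none 2).getD []   -- s[1::2]
        if PySem.Set.equal (PySem.Set.ofList ev) (PySem.Set.ofList [c0]) &&
           PySem.Set.equal (PySem.Set.ofList od) (PySem.Set.ofList [c1]) then "YES" else "NO"

-- ===== PRECONDITION & SPEC =====
-- Pre_ excludes strings of length < 2, on which A (and B) raise IndexError at s[1] (or s[0]).
def Pre_solution (s : String) : Prop := 2 ≤ s.toList.length
instance (s : String) : Decidable (Pre_solution s) := by unfold Pre_solution; infer_instance
def pvWitness_solution : String := "ab"

def Spec_solution (s : String) (out : String) : Prop := out = solution_alt s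
instance (s : String) (out : String) : Decidable (Spec_solution s out) := by unfold Spec_solution; infer_instance

-- ===== CLAIM (what is proved, stated in full; the proofs are below) =====
def Claim_equal_solution : Prop := ∀ (s : String), Dom_solution s → Pre_solution s → Spec_solution s (solution s)

-- ===== LEMMAS AND PROOFS =====

-- the elements of a list at even indices
def evens : List Char → List Char
  | [] => []
  | [a] => [a]
  | a :: _ :: t => a :: evens t

-- the alternation predicate both programs decide
def altCheck (c0 c1 : Char) : List Char → Bool
  | [] => true
  | [a] => a == c0
  | a :: b :: t => a == c0 && (b == c1 && altCheck c0 c1 t)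

theorem evens_cons (a : Char) (t : List Char) : evens (a :: t) = a :: evens t.tail := by
  cases t <;> simp [evens]

theorem solutionLoop_eq (c0 c1 : Char) :
    ∀ (cs : List Char) (i : Nat), i % 2 = 0 →
      solutionLoop c0 c1 i cs = if altCheck c0 c1 cs then "YES" else "NO"
  | [], i, _ => by simp [solutionLoop, altCheck]
  | [a], i, h => by
    simp only [solutionLoop, altCheck, h]
    by_cases ha : a = c0 <;> simp [ha]
  | a :: b :: t, i, h => by
    have h1 : (i + 1) % 2 ≠ 0 := by omega
    have h2 : (i + 1 + 1) % 2 = 0 := by omega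
    have ih := solutionLoop_eq c0 c1 t (i + 1 + 1) h2
    simp only [solutionLoop, altCheck, h, if_neg h1, ih]
    by_cases ha : a = c0 <;> by_cases hb : b = c1 <;> simp [ha, hb]

theorem filterMap_range_evens :
    ∀ (cs : List Char),
      (List.range ((cs.length + 1) / 2)).filterMap (fun k => cs[2 * k]?) = evens cs
  | [] => by simp [evens]
  | [a] => by simp [evens, List.range_succ]
  | a :: b :: t => by
    have hlen : ((a :: b :: t).length + 1) / 2 = (t.length + 1) / 2 + 1 := by
      simp only [List.length_cons]; omega
    have ih := filterMap_range_evens t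
    rw [hlen, List.range_succ_eq_map]
    simp only [List.filterMap_cons, List.filterMap_map, evens]
    have htail : List.filterMap (fun x => (a :: b :: t)[2 * (x + 1)]?)
        (List.range ((t.length + 1) / 2)) = evens t := by
      rw [← ih]
      apply List.filterMap_congr
      intro k _
      have hk : 2 * (k + 1) = 2 * k + 1 + 1 := by omega
      simp [hk]
    simp [htail]

theorem slice?_zero_two (cs : List Char) :
    PySem.List.slice? cs (some 0) none 2 = some (evens cs) := by
  rw [← filterMap_range_evens cs]
  simp only [PySem.List.slice?, PySem.List.sliceIndices]
  norm_num
  have hcount : (if 0 < cs.length then (((cs.length : Int) + 2 - 1) / 2).toNat else 0)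
      = (cs.length + 1) / 2 := by
    split_ifs with h <;> omega
  rw [hcount]
  apply List.filterMap_congr
  intro k _
  have : ((2 : Int) * (k : Int)).toNat = 2 * k := by omega
  rw [this]

theorem slice?_one_two (a : Char) (t : List Char) :
    PySem.List.slice? (a :: t) (some 1) none 2 = some (evens t) := by
  rw [← filterMap_range_evens t]
  simp only [PySem.List.slice?, PySem.List.sliceIndices]
  norm_num
  have hcount : (if 0 < t.length then (((t.length : Int) + 2 - 1) / 2).toNat else 0)
      = (t.length + 1) / 2 := by
    split_ifs with h <;> omega
  rw [hcount]
  apply List.filterMap_congr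
  intro k _
  have hidx : ((1 : Int) + 2 * (k : Int)).toNat = 2 * k + 1 := by omega
  simp [hidx]

theorem equal_singleton (c : Char) (l : List Char) :
    PySem.Set.equal (PySem.Set.ofList (c :: l)) (PySem.Set.ofList [c]) = l.all (· == c) := by
  rcases h : l.all (· == c) with _ | _
  · simp only [List.all_eq_false, beq_iff_eq] at h
    obtain ⟨x, hx, hxc⟩ := h
    rcases hEq : PySem.Set.equal (PySem.Set.ofList (c :: l)) (PySem.Set.ofList [c]) with _ | _
    · rfl
    · exfalso
      rw [PySem.Set.equal_iff] at hEq
      have := (hEq x).mp (by rw [PySem.Set.mem_ofList]; exact List.mem_cons_of_mem c hx)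
      rw [PySem.Set.mem_ofList] at this
      simp at this
      exact hxc this
  · simp only [List.all_eq_true, beq_iff_eq] at h
    rw [PySem.Set.equal_iff]
    intro x
    rw [PySem.Set.mem_ofList, PySem.Set.mem_ofList]
    constructor
    · intro hx
      rcases List.mem_cons.mp hx with h' | h'
      · simp [h']
      · simp [h x h']
    · intro hx
      simp at hx
      simp [hx]

theorem altCheck_eq (c0 c1 : Char) :
    ∀ (cs : List Char),
      altCheck c0 c1 cs = ((evens cs).all (· == c0) && (evens cs.tail).all (· == c1))
  | [] => by simp [altCheck, evens]
  | [a] => by simp [altCheck, evens]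
  | a :: b :: t => by
    have ih := altCheck_eq c0 c1 t
    simp only [altCheck, evens, List.tail_cons, evens_cons, List.all_cons, ih]
    cases a == c0 <;> cases b == c1 <;> simp [Bool.and_comm]

-- ===== VERDICT (by name: the statement is the Claim_ definition above) =====
theorem solution_spec : Claim_equal_solution := by
  intro s _ hpre
  unfold Spec_solution solution solution_alt Pre_solution at *
  rcases hcs : s.toList with _ | ⟨a, t'⟩
  · simp [hcs] at hpre
  · rcases ht' : t' with _ | ⟨b, t⟩
    · simp [hcs, ht'] at hpre
    · subst ht'
      have h0 : PySem.List.pyGet? (a :: b :: t) (0 : Int) = some a := by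
        simp [PySem.List.pyGet?, PySem.List.pyIdx?, show (0:Int) ≤ (t.length:Int) + 1 by omega]
      have h1 : PySem.List.pyGet? (a :: b :: t) (1 : Int) = some b := by
        simp [PySem.List.pyGet?, PySem.List.pyIdx?]
      simp only [hcs, h0, h1]
      by_cases hab : a = b
      · simp [hab]
      · rw [if_neg hab, if_neg hab]
        rw [slice?_zero_two, slice?_one_two]
        simp only [Option.getD_some, evens, evens_cons]
        rw [equal_singleton a (evens t), equal_singleton b (evens t.tail)]
        rw [solutionLoop_eq a b (a :: b :: t) 0 rfl]
        have hA : altCheck a b (a :: b :: t) = altCheck a b t := by simp [altCheck]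
        rw [hA]
        rw [altCheck_eq a b t]
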